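-- pv_equiv track=rewrite | github.com/CrisChir/MeloTTS-RO | melo/text/utils.py | distribute_phone
-- ===== SOURCE A (Python) =====
-- def distribute_phone(phone_len, word_len):
--     """
--     Distributes the phoneme count across the word's sub-tokens.
--     For example, if a word has 5 phonemes and 2 sub-tokens,
--     it might distribute them as [3, 2].
--     """
--     phones_per_word = phone_len // word_len
--     remaining_phones = phone_len % word_len
--     phone_distribution = []
--     for i in range(word_len):
--         phones = phones_per_word
--         if i < remaining_phones:
--             phones += 1
--         phone_distribution.append(phones)
--     return phone_distribution
-- ===== SOURCE B (Python) =====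
-- def distribute_phone(phone_len, word_len):
--     """Distributes the phoneme count across the word's sub-tokens.
--
--     Greedy fair-share: each sub-token in turn takes the ceiling of the
--     remaining phones divided by the remaining sub-tokens.
--     """
--     out = []
--     p, w = phone_len, word_len
--     while w > 0:
--         take = -(-p // w)  # ceiling division of remaining phones
--         out.append(take)
--         p -= take
--         w -= 1
--     return out
-- ===== Notes on version B (the rewrite author's own statement) =====
-- stated objective: alternative
-- what changed: Replaces the precomputed quotient/remainder plus per-index threshold test by a greedy loop that repeatedly gives the next sub-token the ceiling of remaining phones over remaining sub-tokens, maintaining a shrinking (phones, words) state and no remainder comparison.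
import Mathlib
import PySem

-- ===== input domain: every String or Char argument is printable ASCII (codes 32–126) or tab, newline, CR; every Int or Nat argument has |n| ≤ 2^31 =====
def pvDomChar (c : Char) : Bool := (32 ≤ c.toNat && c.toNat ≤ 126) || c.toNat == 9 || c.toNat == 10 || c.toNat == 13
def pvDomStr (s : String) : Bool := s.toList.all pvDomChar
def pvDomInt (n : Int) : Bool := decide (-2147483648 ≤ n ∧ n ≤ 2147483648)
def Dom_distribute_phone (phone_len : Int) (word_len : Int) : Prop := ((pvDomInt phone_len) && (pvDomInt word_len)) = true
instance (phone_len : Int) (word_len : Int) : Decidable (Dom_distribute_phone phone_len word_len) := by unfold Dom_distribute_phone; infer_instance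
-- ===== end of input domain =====

-- B replaces A's precomputed quotient/remainder + per-index threshold loop by a greedy loop that
-- repeatedly hands the next sub-token the ceiling of remaining phones over remaining sub-tokens (alternative).


-- ===== PORT A =====
def distribute_phone (phone_len : Int) (word_len : Int) : List Int :=
  let phones_per_word := PySem.Int.floordiv phone_len word_len
  let remaining_phones := PySem.Int.mod phone_len word_len
  let phone_distribution : List Int := []
  (PySem.List.pyRange 0 word_len 1).foldl
    (fun acc i =>
      let phones := phones_per_word
      let phones := if i < remaining_phones then phones + 1 else phones
      acc ++ [phones])
    phone_distribution

-- ===== PORT B =====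
-- while w > 0: take = -(-p // w); out.append(take); p -= take; w -= 1
def distribute_phone_alt_loop (p : Int) (w : Int) (out : List Int) : List Int :=
  if h : 0 < w then
    let take := -(PySem.Int.floordiv (-p) w)
    distribute_phone_alt_loop (p - take) (w - 1) (out ++ [take])
  else out
termination_by w.toNat
decreasing_by omega

def distribute_phone_alt (phone_len : Int) (word_len : Int) : List Int :=
  distribute_phone_alt_loop phone_len word_len []

-- ===== PRECONDITION & SPEC =====
-- Pre_ excludes exactly word_len = 0, where Python A raises ZeroDivisionError.
def Pre_distribute_phone (phone_len : Int) (word_len : Int) : Prop := word_len ≠ 0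
instance (phone_len : Int) (word_len : Int) : Decidable (Pre_distribute_phone phone_len word_len) := by unfold Pre_distribute_phone; infer_instance
def pvWitness_distribute_phone : Int × Int := (5, 2)

def Spec_distribute_phone (phone_len : Int) (word_len : Int) (out : List Int) : Prop := out = distribute_phone_alt phone_len word_len
instance (phone_len : Int) (word_len : Int) (out : List Int) : Decidable (Spec_distribute_phone phone_len word_len out) := by unfold Spec_distribute_phone; infer_instance

-- ===== CLAIM (what is proved, stated in full; the proofs are below) =====
def Claim_equal_distribute_phone : Prop := ∀ (phone_len : Int) (word_len : Int), Dom_distribute_phone phone_len word_len → Pre_distribute_phone phone_len word_len → Spec_distribute_phone phone_len word_len (distribute_phone phone_len word_len)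

-- ===== LEMMAS AND PROOFS =====

-- the common closed form both ports are reduced to (proof-only helper)
def pvBlocks (p w : Int) : List Int :=
  List.replicate (PySem.Int.mod p w).toNat (PySem.Int.floordiv p w + 1) ++
  List.replicate (w - PySem.Int.mod p w).toNat (PySem.Int.floordiv p w)

-- A's append-accumulator fold is a map
theorem pv_foldl_append_map (f : Int → Int) (l : List Int) (acc : List Int) :
    l.foldl (fun a i => a ++ [f i]) acc = acc ++ l.map f := by
  induction l generalizing acc with
  | nil => simp
  | cons x xs ih => simp [List.foldl_cons, ih]

-- mapping a front-loaded threshold test over a range yields two replicate blocks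
theorem pv_range_ite_blocks (n m : Nat) (x y : Int) (hm : m ≤ n) :
    (List.range n).map (fun k : Nat => if ((k : Int) < (m : Int)) then x else y)
      = List.replicate m x ++ List.replicate (n - m) y := by
  induction n with
  | zero => simp at hm; simp [hm]
  | succ n ih =>
    rcases Nat.lt_or_ge n m with h | h
    · have hm' : m = n + 1 := by omega
      subst hm'
      rw [List.range_succ, List.map_append]
      have h1 : List.map (fun k : Nat => if ((k : Int) < ((n + 1 : Nat) : Int)) then x else y)
          (List.range n) = List.replicate n x := by
        rw [List.map_congr_left (g := fun _ => x) ?_]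
        · simp [List.map_const']
        · intro k hk
          simp only [List.mem_range] at hk
          have : (k : Int) < ((n + 1 : Nat) : Int) := by push_cast; omega
          rw [if_pos this]
      rw [h1]
      have h2 : ((n : Int) < ((n + 1 : Nat) : Int)) := by push_cast; omega
      simp only [List.map_cons, List.map_nil]
      rw [if_pos h2]
      simp [List.replicate_succ']
    · rw [List.range_succ, List.map_append, ih h]
      have hnm : ¬ ((n : Int) < (m : Int)) := by push_cast; omega
      rw [List.append_assoc]
      congr 1
      rw [show n + 1 - m = (n - m) + 1 from by omega, List.replicate_succ']
      simp only [List.map_cons, List.map_nil]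
      rw [if_neg hnm]

-- A equals the closed form for positive word_len
theorem pv_A_eq_blocks (p w : Int) (hpos : 0 < w) :
    distribute_phone p w = pvBlocks p w := by
  have hr0 := PySem.Int.mod_nonneg (a := p) (b := w) hpos
  have hrw := PySem.Int.mod_lt (a := p) (b := w) hpos
  unfold distribute_phone pvBlocks
  set q := PySem.Int.floordiv p w with hq
  set r := PySem.Int.mod p w with hrdef
  rw [pv_foldl_append_map (f := fun i => if i < r then q + 1 else q)]
  rw [PySem.List.pyRange_one (a := 0) (b := w)]
  simp only [List.map_map, List.nil_append]
  have hcast : ∀ k : Nat, ((fun i => if i < r then q + 1 else q) ∘ fun k : Nat => (0 : Int) + k) k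
      = (fun k : Nat => if ((k : Int) < ((r.toNat : Nat) : Int)) then q + 1 else q) k := by
    intro k; simp [Int.toNat_of_nonneg hr0]
  rw [List.map_congr_left (fun k _ => hcast k)]
  rw [pv_range_ite_blocks (n := (w - 0).toNat) (m := r.toNat) (x := q + 1) (y := q) (by omega)]
  rw [show (w - 0).toNat - r.toNat = (w - r).toNat from by omega]

-- B's loop produces the closed form for positive word_len (Nat induction on word_len)
theorem pv_loop_blocks : ∀ (n : Nat) (p : Int) (acc : List Int),
    distribute_phone_alt_loop p ((n : Int) + 1) acc = acc ++ pvBlocks p ((n : Int) + 1) := by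
  intro n
  induction n with
  | zero =>
    intro p acc
    have h1 : PySem.Int.floordiv p 1 * 1 + PySem.Int.mod p 1 = p :=
      PySem.Int.floordiv_mul_add_mod p 1
    have hr0 := PySem.Int.mod_nonneg (a := p) (b := 1) (by omega)
    have hrw := PySem.Int.mod_lt (a := p) (b := 1) (by omega)
    have hq : PySem.Int.floordiv p 1 = p := by omega
    have hr : PySem.Int.mod p 1 = 0 := by omega
    have ht : -(PySem.Int.floordiv (-p) 1) = p := by
      have := PySem.Int.floordiv_mul_add_mod (-p) 1
      have := PySem.Int.mod_nonneg (a := -p) (b := 1) (by omega)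
      have := PySem.Int.mod_lt (a := -p) (b := 1) (by omega)
      omega
    rw [distribute_phone_alt_loop]
    simp only [Nat.cast_zero, zero_add]
    rw [dif_pos (by omega : (0:Int) < 1)]
    simp only [ht]
    rw [distribute_phone_alt_loop]
    rw [dif_neg (by omega : ¬ (0:Int) < 1 - 1)]
    unfold pvBlocks
    rw [hq, hr]
    simp
  | succ n ih =>
    intro p acc
    simp only [Nat.cast_add, Nat.cast_one]
    set w : Int := ((n : Int) + 1) + 1 with hw
    have hwpos : 0 < w := by omega
    have h1 : PySem.Int.floordiv p w * w + PySem.Int.mod p w = p :=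
      PySem.Int.floordiv_mul_add_mod p w
    have hr0 := PySem.Int.mod_nonneg (a := p) (b := w) hwpos
    have hrw := PySem.Int.mod_lt (a := p) (b := w) hwpos
    set q := PySem.Int.floordiv p w with hq
    set r := PySem.Int.mod p w with hr
    -- the take of this iteration is the ceiling q + (0 or 1)
    have htake : -(PySem.Int.floordiv (-p) w) = (if r = 0 then q else q + 1) := by
      rcases eq_or_ne r 0 with h0 | h0
      · rw [if_pos h0]
        exact (PySem.Int.neg_floordiv_neg_eq_iff_of_pos (a := p) (b := w) (q := q) hwpos).mpr
          (by constructor <;> nlinarith [h1, h0])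
      · rw [if_neg h0]
        have hr1 : 1 ≤ r := by omega
        exact (PySem.Int.neg_floordiv_neg_eq_iff_of_pos (a := p) (b := w) (q := q + 1) hwpos).mpr
          (by constructor <;> nlinarith [h1, hr1, hrw])
    have h1' : q * (((n : Int) + 1) + 1) + r = p := h1
    rw [distribute_phone_alt_loop, dif_pos hwpos]
    simp only [htake]
    have hw1 : w - 1 = (n : Int) + 1 := by omega
    rcases eq_or_ne r 0 with h0 | h0
    · -- even split: every remaining sub-token gets exactly q
      rw [if_pos h0, hw1, ih]
      have hq' : PySem.Int.floordiv (p - q) ((n : Int) + 1) = q := by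
        refine (PySem.Int.floordiv_eq_iff_of_pos (by omega)).mpr ?_
        constructor <;> nlinarith [h1', h0]
      have hr' : PySem.Int.mod (p - q) ((n : Int) + 1) = 0 := by
        have hdm := PySem.Int.floordiv_mul_add_mod (p - q) ((n : Int) + 1)
        rw [hq'] at hdm; linarith [hdm, h1']
      unfold pvBlocks
      rw [hq', hr', ← hq, ← hr, h0]
      simp only [Int.toNat_zero, List.replicate_zero, List.nil_append]
      rw [show ((n : Int) + 1 - 0).toNat = n + 1 from by omega,
          show (w - 0).toNat = (n + 1) + 1 from by omega, List.replicate_succ]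
      simp [List.replicate_succ]
    · -- uneven: this sub-token takes q+1, remainder shrinks by one
      have hr1 : 1 ≤ r := by omega
      rw [if_neg h0, hw1, ih]
      have hq' : PySem.Int.floordiv (p - (q + 1)) ((n : Int) + 1) = q := by
        refine (PySem.Int.floordiv_eq_iff_of_pos (by omega)).mpr ?_
        constructor <;> nlinarith [h1', hr1, hrw, hw]
      have hr' : PySem.Int.mod (p - (q + 1)) ((n : Int) + 1) = r - 1 := by
        have hdm := PySem.Int.floordiv_mul_add_mod (p - (q + 1)) ((n : Int) + 1)
        rw [hq'] at hdm; linarith [hdm, h1']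
      unfold pvBlocks
      rw [hq', hr', ← hq, ← hr]
      have hrt : r.toNat = (r - 1).toNat + 1 := by omega
      have hc : (((n : Int) + 1) - (r - 1)).toNat = ((w : Int) - r).toNat := by omega
      rw [hrt, hc, List.replicate_succ]
      simp

-- ===== VERDICT (by name: the statement is the Claim_ definition above) =====
theorem distribute_phone_spec : Claim_equal_distribute_phone := by
  intro p w _ hw
  unfold Spec_distribute_phone distribute_phone_alt
  rcases lt_trichotomy w 0 with hneg | hz | hpos
  · -- negative word_len: empty range on the left, loop exits immediately on the right
    rw [distribute_phone_alt_loop, dif_neg (by omega)]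
    unfold distribute_phone
    rw [PySem.List.pyRange_one_eq_nil (by omega)]
    rfl
  · exact absurd hz hw
  · have hn : w = ((w - 1).toNat : Int) + 1 := by omega
    rw [pv_A_eq_blocks p w hpos, hn, pv_loop_blocks (w - 1).toNat p []]
    simp
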